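-- pv_equiv track=rewrite | github.com/Jgalvis01/EstructurasDeDatos | tarea1.py | sumarValoresMatriz
-- ===== SOURCE A (Python) =====
-- def sumarValoresMatriz(disp,listp):
--         ans = 0
--         i = 0
--         while i < len(listp):
--                 if listp[i][0] in disp:
--                         n = 0
--                         dispL=disp[listp[i][0]]
--                         while n < len(dispL) :
--                                 if listp[i][1] == dispL[n][0]:
--                                         ans+= dispL[n][1]
--                                 n+=1
--                 i+=1
--
--         return ans
-- ===== SOURCE B (Python) =====
-- def sumarValoresMatriz(disp, listp):
--     count = {}
--     for k, s in listp:
--         count[(k, s)] = count.get((k, s), 0) + 1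
--     ans = 0
--     for key, dispL in disp.items():
--         for sub, val in dispL:
--             ans += val * count.get((key, sub), 0)
--     return ans
-- ===== Notes on version B (the rewrite author's own statement) =====
-- stated objective: alternative
-- what changed: B inverts the traversal: instead of rescanning the matching dispatch row for every element of listp, it builds a (key, subkey) -> multiplicity table over listp once and then makes one pass over the dispatch table adding val * count; it trades A's per-element row scan for dict construction and lookups.
import Mathlib
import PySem

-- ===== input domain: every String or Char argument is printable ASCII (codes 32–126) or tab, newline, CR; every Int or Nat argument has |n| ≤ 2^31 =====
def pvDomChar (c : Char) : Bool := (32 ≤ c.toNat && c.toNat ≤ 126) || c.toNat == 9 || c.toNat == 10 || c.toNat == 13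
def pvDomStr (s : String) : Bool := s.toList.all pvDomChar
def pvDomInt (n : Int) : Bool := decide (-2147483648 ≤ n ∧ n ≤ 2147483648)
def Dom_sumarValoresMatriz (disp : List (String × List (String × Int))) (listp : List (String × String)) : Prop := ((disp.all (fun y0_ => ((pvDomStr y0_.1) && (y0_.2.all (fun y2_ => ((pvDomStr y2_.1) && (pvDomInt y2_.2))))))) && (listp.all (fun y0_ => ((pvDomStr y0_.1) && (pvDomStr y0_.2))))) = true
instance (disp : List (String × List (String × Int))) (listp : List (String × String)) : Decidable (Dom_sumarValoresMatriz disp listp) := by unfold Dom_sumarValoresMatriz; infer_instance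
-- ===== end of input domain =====

-- B inverts the traversal: a precomputed (key, subkey) multiplicity table over listp, then one
-- pass over the dispatch table adding val * count (objective: alternative decomposition).

-- ===== PORT A =====
-- `listp[i][0] in disp` on the dict: key membership (first match = only match, keys unique)
def pyDictContains (disp : List (String × List (String × Int))) (k : String) : Bool :=
  disp.any (fun q => q.1 == k)

-- `disp[k]` on the dict: the value stored at k ([] unreachable: guarded by pyDictContains)
def pyDictGet (disp : List (String × List (String × Int))) (k : String) : List (String × Int) :=
  ((disp.find? (fun q => q.1 == k)).map Prod.snd).getD []

def sumarValoresMatriz (disp : List (String × List (String × Int))) (listp : List (String × String)) : Int :=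
  -- while i < len(listp): outer fold; inner while over dispL
  listp.foldl (fun ans p =>
    if pyDictContains disp p.1 then
      (pyDictGet disp p.1).foldl (fun ans e => if p.2 == e.1 then ans + e.2 else ans) ans
    else ans) 0

-- ===== PORT B =====
def sumarValoresMatriz_alt (disp : List (String × List (String × Int))) (listp : List (String × String)) : Int :=
  -- count[(k, s)] = count.get((k, s), 0) + 1 over listp
  let count : PySem.Dict (String × String) Int :=
    listp.foldl (fun d p => d.insert p (d.getD p 0 + 1)) PySem.Dict.empty
  -- for key, dispL in disp.items(): for sub, val in dispL: ans += val * count.get((key, sub), 0)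
  disp.foldl (fun ans kL =>
    kL.2.foldl (fun ans e => ans + e.2 * count.getD (kL.1, e.1) 0) ans) 0

-- ===== PRECONDITION & SPEC =====
-- disp is a Python dict, whose keys are necessarily distinct; association lists with duplicate
-- keys represent no actual Python input, so Pre_ requires the keys to be distinct.
def Pre_sumarValoresMatriz (disp : List (String × List (String × Int))) (listp : List (String × String)) : Prop :=
  (disp.map Prod.fst).Nodup

instance (disp : List (String × List (String × Int))) (listp : List (String × String)) : Decidable (Pre_sumarValoresMatriz disp listp) := by unfold Pre_sumarValoresMatriz; infer_instance

def pvWitness_sumarValoresMatriz : (List (String × List (String × Int))) × (List (String × String)) :=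
  ([("a", [("x", 2), ("y", 3)]), ("b", [("x", 5)])], [("a", "x"), ("b", "z"), ("a", "x")])

def Spec_sumarValoresMatriz (disp : List (String × List (String × Int))) (listp : List (String × String)) (out : Int) : Prop := out = sumarValoresMatriz_alt disp listp
instance (disp : List (String × List (String × Int))) (listp : List (String × String)) (out : Int) : Decidable (Spec_sumarValoresMatriz disp listp out) := by unfold Spec_sumarValoresMatriz; infer_instance

-- ===== CLAIM (what is proved, stated in full; the proofs are below) =====
def Claim_equal_sumarValoresMatriz : Prop := ∀ (disp : List (String × List (String × Int))) (listp : List (String × String)), Dom_sumarValoresMatriz disp listp → Pre_sumarValoresMatriz disp listp → Spec_sumarValoresMatriz disp listp (sumarValoresMatriz disp listp)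

-- ===== LEMMAS AND PROOFS =====

-- the inner while-loop of A sums the matching entries of one row
def pvInnerSum (s : String) (L : List (String × Int)) : Int :=
  (L.map (fun e => if s == e.1 then e.2 else 0)).sum

-- A's contribution of one element of listp
def pvG (disp : List (String × List (String × Int))) (p : String × String) : Int :=
  if pyDictContains disp p.1 then pvInnerSum p.2 (pyDictGet disp p.1) else 0

-- B's value as a double sum over the dispatch table, parametric in the count function
def pvS (disp : List (String × List (String × Int))) (c : String × String → Int) : Int :=
  (disp.map (fun kL => (kL.2.map (fun e => e.2 * c (kL.1, e.1))).sum)).sum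

theorem pvInnerA_eq (s : String) (L : List (String × Int)) (ans : Int) :
    L.foldl (fun ans e => if s == e.1 then ans + e.2 else ans) ans = ans + pvInnerSum s L := by
  induction L generalizing ans with
  | nil => simp [pvInnerSum]
  | cons e L ih =>
    rw [List.foldl_cons, ih]
    by_cases h : s = e.1 <;> simp [pvInnerSum, h] <;> ring

theorem pvA_eq_sum (disp : List (String × List (String × Int))) (listp : List (String × String)) :
    sumarValoresMatriz disp listp = (listp.map (pvG disp)).sum := by
  unfold sumarValoresMatriz
  suffices h : ∀ (l : List (String × String)) (ans : Int),
      l.foldl (fun ans p =>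
        if pyDictContains disp p.1 then
          (pyDictGet disp p.1).foldl (fun ans e => if p.2 == e.1 then ans + e.2 else ans) ans
        else ans) ans = ans + (l.map (pvG disp)).sum by
    simpa using h listp 0
  intro l
  induction l with
  | nil => simp
  | cons p l ih =>
    intro ans
    rw [List.foldl_cons, ih]
    by_cases h : pyDictContains disp p.1
    · rw [if_pos h, pvInnerA_eq]
      simp [pvG, h]
      try ring
    · rw [if_neg h]
      simp [pvG, h]
      try ring

theorem pvInnerB_eq (c : PySem.Dict (String × String) Int) (k : String)
    (L : List (String × Int)) (ans : Int) :
    L.foldl (fun ans e => ans + e.2 * c.getD (k, e.1) 0) ans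
      = ans + (L.map (fun e => e.2 * c.getD (k, e.1) 0)).sum := by
  induction L generalizing ans with
  | nil => simp
  | cons e L ih => simp [ih]; ring

theorem pvB_eq_sum (disp : List (String × List (String × Int))) (listp : List (String × String)) :
    sumarValoresMatriz_alt disp listp
      = pvS disp (fun p => (listp.count p : Int)) := by
  unfold sumarValoresMatriz_alt pvS
  have hc : ∀ p : String × String,
      (listp.foldl (fun d p => d.insert p (d.getD p 0 + 1)) PySem.Dict.empty).getD p 0
        = (listp.count p : Int) := by
    intro p
    rw [PySem.Dict.getD_foldl_insert_add_one]
    simp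
  suffices h : ∀ (l : List (String × List (String × Int))) (ans : Int),
      l.foldl (fun ans kL =>
        kL.2.foldl (fun ans e => ans + e.2 *
          (listp.foldl (fun d p => d.insert p (d.getD p 0 + 1)) PySem.Dict.empty).getD (kL.1, e.1) 0) ans) ans
        = ans + (l.map (fun kL => (kL.2.map (fun e => e.2 * (listp.count (kL.1, e.1) : Int))).sum)).sum by
    simpa using h disp 0
  intro l
  induction l with
  | nil => simp
  | cons kL l ih =>
    intro ans
    rw [List.foldl_cons, pvInnerB_eq, ih]
    simp only [hc]
    simp; ring

theorem pv_sum_map_add {α : Type} (l : List α) (f g : α → Int) :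
    (l.map (fun x => f x + g x)).sum = (l.map f).sum + (l.map g).sum := by
  induction l with
  | nil => simp
  | cons x l ih => simp [ih]; ring

-- with distinct keys, summing an if-guarded contribution over the table is A's guarded lookup
theorem pv_delta_eq (disp : List (String × List (String × Int)))
    (hnd : (disp.map Prod.fst).Nodup) (p : String × String) :
    (disp.map (fun kL => (kL.2.map (fun e =>
        e.2 * (if p = (kL.1, e.1) then (1 : Int) else 0))).sum)).sum = pvG disp p := by
  induction disp with
  | nil => simp [pvG, pyDictContains]
  | cons kL disp ih =>
    simp only [List.map_cons, List.nodup_cons, List.mem_map] at hnd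
    obtain ⟨hk, hnd'⟩ := hnd
    by_cases h : p.1 = kL.1
    · -- head matches: tail contributes 0 because its keys avoid p.1
      have htail : (disp.map (fun kL => (kL.2.map (fun e =>
          e.2 * (if p = (kL.1, e.1) then (1 : Int) else 0))).sum)).sum = 0 := by
        have : ∀ kL' ∈ disp, (kL'.2.map (fun e =>
            e.2 * (if p = (kL'.1, e.1) then (1 : Int) else 0))).sum = 0 := by
          intro kL' hmem
          have hne : p.1 ≠ kL'.1 := by
            intro he; exact hk ⟨kL', hmem, by rw [← he, h]⟩
          have : ∀ e ∈ kL'.2, e.2 * (if p = (kL'.1, e.1) then (1 : Int) else 0) = 0 := by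
            intro e _
            have : p ≠ (kL'.1, e.1) := by
              intro hp; exact hne (by rw [hp])
            simp [this]
          rw [List.map_congr_left this]; simp
        rw [List.map_congr_left this]; simp
      have hhead : (kL.2.map (fun e =>
          e.2 * (if p = (kL.1, e.1) then (1 : Int) else 0))).sum = pvInnerSum p.2 kL.2 := by
        unfold pvInnerSum
        congr 1
        apply List.map_congr_left
        intro e _
        by_cases hs : p.2 = e.1
        · have : p = (kL.1, e.1) := Prod.ext h hs
          simp [this, hs]
        · have : p ≠ (kL.1, e.1) := by
            intro hp; exact hs (by rw [hp])
          simp [this, hs]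
      simp only [List.map_cons, List.sum_cons, htail, hhead, add_zero]
      unfold pvG pyDictContains pyDictGet
      simp [List.any_cons, List.find?_cons, h]
    · -- head key differs: reduces to the tail
      have hhead : (kL.2.map (fun e =>
          e.2 * (if p = (kL.1, e.1) then (1 : Int) else 0))).sum = 0 := by
        have : ∀ e ∈ kL.2, e.2 * (if p = (kL.1, e.1) then (1 : Int) else 0) = 0 := by
          intro e _
          have : p ≠ (kL.1, e.1) := by intro hp; exact h (by rw [hp])
          simp [this]
        rw [List.map_congr_left this]; simp
      simp only [List.map_cons, List.sum_cons, hhead, zero_add, ih hnd']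
      unfold pvG pyDictContains pyDictGet
      have hb : (kL.1 == p.1) = false := by
        simp [beq_iff_eq]; intro he; exact h he.symm
      rw [List.find?_cons_of_neg (by simp [hb]), List.any_cons, hb]
      simp only [Bool.false_or]

theorem pv_main (disp : List (String × List (String × Int)))
    (hnd : (disp.map Prod.fst).Nodup) (listp : List (String × String)) :
    (listp.map (pvG disp)).sum = pvS disp (fun p => (listp.count p : Int)) := by
  induction listp with
  | nil =>
    unfold pvS
    have : ∀ kL ∈ disp, (kL.2.map (fun e =>
        e.2 * ((List.count (kL.1, e.1) ([] : List (String × String)) : Int)))).sum = 0 := by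
      intro kL _
      simp
    rw [List.map_congr_left this]; simp
  | cons p rest ih =>
    have hsplit : ∀ q : String × String,
        ((p :: rest).count q : Int) = (rest.count q : Int) + (if q = p then 1 else 0) := by
      intro q
      rw [List.count_cons]
      by_cases h : p = q
      · simp [h]
      · have : (p == q) = false := by simp [beq_iff_eq, h]
        have h' : ¬ q = p := fun he => h he.symm
        simp [this, h']
    unfold pvS
    have hstep : ∀ kL : String × List (String × Int),
        (kL.2.map (fun e => e.2 * (((p :: rest).count (kL.1, e.1) : Int)))).sum
          = (kL.2.map (fun e => e.2 * ((rest.count (kL.1, e.1) : Int)))).sum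
            + (kL.2.map (fun e => e.2 * (if (kL.1, e.1) = p then (1 : Int) else 0))).sum := by
      intro kL
      rw [← pv_sum_map_add]
      congr 1
      apply List.map_congr_left
      intro e _
      rw [hsplit]
      ring
    calc (List.map (pvG disp) (p :: rest)).sum
        = pvG disp p + (rest.map (pvG disp)).sum := by simp
      _ = pvG disp p + pvS disp (fun q => (rest.count q : Int)) := by rw [ih]
      _ = (disp.map (fun kL => (kL.2.map (fun e =>
            e.2 * (((p :: rest).count (kL.1, e.1) : Int)))).sum)).sum := by
          rw [List.map_congr_left (fun kL _ => hstep kL), pv_sum_map_add]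
          unfold pvS
          have hd : (disp.map (fun kL => (kL.2.map (fun e =>
              e.2 * (if (kL.1, e.1) = p then (1 : Int) else 0))).sum)).sum = pvG disp p := by
            have := pv_delta_eq disp hnd p
            rw [← this]
            congr 1
            apply List.map_congr_left
            intro kL _
            congr 1
            apply List.map_congr_left
            intro e _
            by_cases h : p = (kL.1, e.1)
            · simp [h]
            · have h' : ¬ (kL.1, e.1) = p := fun he => h he.symm
              simp [h, h']
          rw [hd]; ring

-- ===== VERDICT (by name: the statement is the Claim_ definition above) =====
theorem sumarValoresMatriz_spec : Claim_equal_sumarValoresMatriz := by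
  intro disp listp _ hpre
  unfold Spec_sumarValoresMatriz
  rw [pvA_eq_sum, pvB_eq_sum, pv_main disp hpre listp]
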